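-- pv_equiv track=rewrite | github.com/clairej12/touchdown-dataset | metadata/map_graph_and_routes.py | remove_consecutive_repeats
-- ===== SOURCE A (Python) =====
-- def remove_consecutive_repeats(lst):
--     idx_mapping = {0 : 0} # old list index to new list index
--     idx = 0
--     if not lst:
--         return lst  # Handle empty list case
--     result = [lst[0]]  # Start with the first element
--     for i,item in enumerate(lst[1:]):
--         if item != result[-1]:  # Add only if different from the last added item
--             result.append(item)
--             idx += 1
--         idx_mapping[i+1] = idx
--     return result, idx_mapping
-- ===== SOURCE B (Python) =====
-- def remove_consecutive_repeats(lst):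
--     if not lst:
--         return lst  # Handle empty list case (same as A: bare list, not a tuple)
--     n = len(lst)
--     result = []
--     idx_mapping = {}
--     i = 0
--     run = 0
--     while i < n:
--         # scan to the end of the run starting at i
--         j = i + 1
--         while j < n and lst[j] == lst[i]:
--             j += 1
--         result.append(lst[i])
--         for p in range(i, j):
--             idx_mapping[p] = run
--         run += 1
--         i = j
--     return result, idx_mapping
-- ===== Notes on version B (the rewrite author's own statement) =====
-- stated objective: alternative
-- what changed: A's single pass that compares each element with the last kept element (result[-1]) and grows a counter is replaced by a run-length scanner: an outer loop that finds each maximal run of equal elements with an inner scan, appends one representative per run, and fills the mapping for the whole run with the run's index in one range pass.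
-- outside the precondition, e.g. on remove_consecutive_repeats([]): A returns (), B returns ()
import Mathlib
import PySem

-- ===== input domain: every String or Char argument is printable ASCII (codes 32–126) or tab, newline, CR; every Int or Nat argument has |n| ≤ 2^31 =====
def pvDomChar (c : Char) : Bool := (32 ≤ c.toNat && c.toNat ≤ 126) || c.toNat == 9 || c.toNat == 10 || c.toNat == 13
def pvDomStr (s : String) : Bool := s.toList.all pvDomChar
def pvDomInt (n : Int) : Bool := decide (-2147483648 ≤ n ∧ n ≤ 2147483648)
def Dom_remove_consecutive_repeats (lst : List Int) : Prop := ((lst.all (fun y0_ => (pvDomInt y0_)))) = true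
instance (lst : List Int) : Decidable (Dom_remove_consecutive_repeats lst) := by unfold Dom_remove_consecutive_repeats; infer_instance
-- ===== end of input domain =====

-- B replaces A's fused compare-with-last-kept pass by a run-length scanner: an outer loop
-- over maximal runs (inner scan finds the run end, one range pass fills the mapping with the
-- run index); alternative structure, same cost.  Pre_ excludes only the empty list, where A
-- returns a bare list instead of a (list, dict) pair.


-- ===== PORT A =====
-- result[-1] is ported as getLast! : A's loop keeps result nonempty, so this is exact.
def remove_consecutive_repeats (lst : List Int) : List Int × (List (Int × Int)) :=
  let idx_mapping : PySem.Dict Int Int := (PySem.Dict.empty).insert 0 0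
  match lst with
  | [] => ([], [])   -- Python returns the bare list here (not a pair); excluded by Pre_
  | h :: t =>
    let s := (PySem.List.enumerate t 0).foldl
      (fun (st : List Int × Int × PySem.Dict Int Int) (p : Int × Int) =>
        let ri := if p.2 ≠ st.1.getLast! then (st.1 ++ [p.2], st.2.1 + 1) else (st.1, st.2.1)
        (ri.1, ri.2, st.2.2.insert (p.1 + 1) ri.2))
      ([h], 0, idx_mapping)
    (s.1, s.2.2.items)

-- ===== PORT B =====
-- inner while loop 'j = i+1; while j < n and lst[j] == lst[i]: j += 1' on the suffix after
-- position i: number of further elements equal to the run's head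
def pvRunLen (v : Int) : List Int → Nat
  | [] => 0
  | x :: xs => if x == v then pvRunLen v xs + 1 else 0

-- outer while loop of B on the suffix lst[i:], carrying pos = i, run, result and the dict
def pvLoopB : List Int → Int → Int → List Int → PySem.Dict Int Int → List Int × PySem.Dict Int Int
  | [], _, _, res, d => (res, d)
  | x :: xs, pos, run, res, d =>
    let k := pvRunLen x xs
    let d' := (PySem.List.pyRange pos (pos + (k : Int) + 1) 1).foldl (fun d p => d.insert p run) d
    pvLoopB (xs.drop k) (pos + (k : Int) + 1) (run + 1) (res ++ [x]) d'
  termination_by t => t.length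
  decreasing_by simp [List.length_drop]

def remove_consecutive_repeats_alt (lst : List Int) : List Int × (List (Int × Int)) :=
  match lst with
  | [] => ([], [])   -- Python returns the bare list here (not a pair); excluded by Pre_
  | h :: t =>
    let r := pvLoopB (h :: t) 0 0 [] PySem.Dict.empty
    (r.1, r.2.items)

-- ===== PRECONDITION & SPEC =====
-- Pre_ excludes only the empty list, on which A (and B) returns the bare list [] rather than a
-- (list, dict) pair — not a value of the declared return type List Int × List (Int × Int).
def Pre_remove_consecutive_repeats (lst : List Int) : Prop := lst ≠ []
instance (lst : List Int) : Decidable (Pre_remove_consecutive_repeats lst) := by unfold Pre_remove_consecutive_repeats; infer_instance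
def pvWitness_remove_consecutive_repeats : List Int := [1, 1, 2]

def Spec_remove_consecutive_repeats (lst : List Int) (out : List Int × (List (Int × Int))) : Prop := out = remove_consecutive_repeats_alt lst
instance (lst : List Int) (out : List Int × (List (Int × Int))) : Decidable (Spec_remove_consecutive_repeats lst out) := by unfold Spec_remove_consecutive_repeats; infer_instance

-- ===== CLAIM (what is proved, stated in full; the proofs are below) =====
def Claim_equal_remove_consecutive_repeats : Prop := ∀ (lst : List Int), Dom_remove_consecutive_repeats lst → Pre_remove_consecutive_repeats lst → Spec_remove_consecutive_repeats lst (remove_consecutive_repeats lst)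

-- ===== LEMMAS AND PROOFS =====

-- canonical run-level recursion both ports are reduced to (pure: no dict)
def pvRuns : List Int → Int → Int → List Int × List (Int × Int)
  | [], _, _ => ([], [])
  | x :: xs, pos, run =>
    let k := pvRunLen x xs
    let r := pvRuns (xs.drop k) (pos + (k : Int) + 1) (run + 1)
    (x :: r.1, (PySem.List.pyRange pos (pos + (k : Int) + 1) 1).map (fun p => (p, run)) ++ r.2)
  termination_by t => t.length
  decreasing_by simp [List.length_drop]

-- inserting one key larger than every present key appends
theorem pvInsertApp (m : List (Int × Int)) (key v : Int) (h : ∀ p ∈ m, p.1 < key) :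
    (PySem.Dict.mk m).insert key v = PySem.Dict.mk (m ++ [(key, v)]) := by
  apply PySem.Dict.ext
  rw [PySem.Dict.items_insert_of_not_contains]
  rw [PySem.Dict.contains_eq_decide_mem_keys]
  simp only [PySem.Dict.keys_mk, decide_eq_false_iff_not, List.mem_map, not_exists, not_and]
  rintro ⟨a, b⟩ hab hy
  have := h _ hab
  simp_all

-- a range-fill loop over keys larger than every present key appends its entries
theorem pvInsertFresh (m : List (Int × Int)) (run pos b : Int) (hm : ∀ p ∈ m, p.1 < pos) :
    (PySem.List.pyRange pos b 1).foldl (fun d p => d.insert p run) (PySem.Dict.mk m)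
      = PySem.Dict.mk (m ++ (PySem.List.pyRange pos b 1).map (fun p => (p, run))) := by
  apply PySem.Dict.ext
  have h := PySem.Dict.items_foldl_insert_fresh (PySem.List.pyRange pos b 1)
      (fun a => a) (fun _ => run) (PySem.Dict.mk m) ?_ ?_
  · simpa using h
  · intro a ha
    rw [PySem.Dict.contains_eq_decide_mem_keys]
    simp only [PySem.Dict.keys_mk, decide_eq_false_iff_not, List.mem_map, not_exists, not_and]
    rintro ⟨c, d⟩ hcd hy
    have := hm _ hcd
    have := (PySem.List.mem_pyRange_one.mp ha).1
    simp_all; omega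
  · simpa using PySem.List.nodup_pyRange_one pos b

-- B's loop, reduced to the canonical run recursion
theorem pvLoopB_eq : ∀ (n : Nat) (t : List Int), t.length ≤ n →
    ∀ (pos run : Int) (res : List Int) (m : List (Int × Int)), (∀ p ∈ m, p.1 < pos) →
    pvLoopB t pos run res (PySem.Dict.mk m)
      = (res ++ (pvRuns t pos run).1, PySem.Dict.mk (m ++ (pvRuns t pos run).2)) := by
  intro n
  induction n with
  | zero =>
    intro t ht pos run res m hm
    have ht0 : t = [] := by cases t with | nil => rfl | cons a b => simp at ht
    subst ht0; simp [pvLoopB, pvRuns]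
  | succ n ih =>
    intro t ht pos run res m hm
    cases t with
    | nil => simp [pvLoopB, pvRuns]
    | cons x xs =>
      rw [pvLoopB, pvRuns]
      simp only []
      rw [pvInsertFresh m run pos _ hm]
      rw [ih (xs.drop (pvRunLen x xs)) (by simp at ht ⊢; omega)]
      · simp [List.append_assoc]
      · intro p hp
        rcases List.mem_append.mp hp with h1 | h2
        · have := hm p h1; omega
        · rcases List.mem_map.mp h2 with ⟨q, hq, rfl⟩
          have := (PySem.List.mem_pyRange_one.mp hq).2
          simpa using this

-- A's element-wise fold, reduced to the canonical run recursion: from the middle of a run of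
-- `prev` (with idx changes seen so far and next key s+1), the rest of the current run fills
-- the mapping with idx, and the remainder proceeds run by run.
theorem pvLemA : ∀ (t : List Int) (prev idx s : Int) (res : List Int) (m : List (Int × Int)),
    res ≠ [] → res.getLast! = prev → (∀ p ∈ m, p.1 < s + 1) →
    (PySem.List.enumerate t s).foldl
      (fun (st : List Int × Int × PySem.Dict Int Int) (p : Int × Int) =>
        let ri := if p.2 ≠ st.1.getLast! then (st.1 ++ [p.2], st.2.1 + 1) else (st.1, st.2.1)
        (ri.1, ri.2, st.2.2.insert (p.1 + 1) ri.2))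
      (res, idx, PySem.Dict.mk m)
    = (res ++ (pvRuns (t.drop (pvRunLen prev t)) (s + (pvRunLen prev t : Int) + 1) (idx + 1)).1,
       idx + (pvRuns (t.drop (pvRunLen prev t)) (s + (pvRunLen prev t : Int) + 1) (idx + 1)).1.length,
       PySem.Dict.mk (m ++ (PySem.List.pyRange (s + 1) (s + (pvRunLen prev t : Int) + 1) 1).map (fun p => (p, idx))
                        ++ (pvRuns (t.drop (pvRunLen prev t)) (s + (pvRunLen prev t : Int) + 1) (idx + 1)).2)) := by
  intro t
  induction t with
  | nil =>
    intro prev idx s res m hne hlast hm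
    simp [pvRunLen, pvRuns, PySem.List.enumerate_nil]
  | cons x xs ih =>
    intro prev idx s res m hne hlast hm
    rw [PySem.List.enumerate_cons, List.foldl_cons]
    by_cases hx : x = prev
    · -- same as the last kept element: the run of prev continues
      subst hx
      simp only [hlast, ne_eq, not_true_eq_false, if_false]
      rw [pvInsertApp m (s + 1) idx (fun p hp => hm p hp)]
      rw [ih x idx (s + 1) res (m ++ [(s + 1, idx)]) hne hlast
            (by intro p hp; rcases List.mem_append.mp hp with h1 | h2
                · have := hm p h1; omega
                · obtain rfl := List.mem_singleton.mp h2
                  exact (by omega : (s : Int) + 1 < s + 1 + 1))]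
      have hk : pvRunLen x (x :: xs) = pvRunLen x xs + 1 := by simp [pvRunLen]
      rw [hk]
      rw [show (x :: xs).drop (pvRunLen x xs + 1) = xs.drop (pvRunLen x xs) from rfl]
      push_cast
      rw [show s + ((pvRunLen x xs : Int) + 1) + 1 = s + 1 + (pvRunLen x xs : Int) + 1 by ring]
      rw [PySem.List.pyRange_one_cons (show (s + 1 : Int) < s + 1 + (pvRunLen x xs : Int) + 1 by omega)]
      simp [List.map_cons, List.append_assoc]
    · -- different: a new run starts at x
      simp only [hlast, ne_eq, hx, not_false_eq_true, if_pos]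
      rw [pvInsertApp m (s + 1) (idx + 1) (fun p hp => hm p hp)]
      rw [ih x (idx + 1) (s + 1) (res ++ [x]) (m ++ [(s + 1, idx + 1)])
            (by simp) (by simp)
            (by intro p hp; rcases List.mem_append.mp hp with h1 | h2
                · have := hm p h1; omega
                · obtain rfl := List.mem_singleton.mp h2
                  exact (by omega : (s : Int) + 1 < s + 1 + 1))]
      have hk : pvRunLen prev (x :: xs) = 0 := by simp [pvRunLen, hx]
      rw [hk]
      simp only [List.drop_zero]
      rw [pvRuns]
      push_cast
      rw [show s + (0 : Int) + 1 = s + 1 by ring]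
      rw [PySem.List.pyRange_one_eq_nil (le_refl (s + 1))]
      rw [PySem.List.pyRange_one_cons (show (s + 1 : Int) < s + 1 + (pvRunLen x xs : Int) + 1 by omega)]
      refine Prod.ext ?_ (Prod.ext ?_ ?_)
      · simp [List.append_assoc]
      · simp only [List.length_cons]; push_cast; omega
      · simp [List.map_cons, List.append_assoc]

-- ===== VERDICT (by name: the statement is the Claim_ definition above) =====
theorem remove_consecutive_repeats_spec : Claim_equal_remove_consecutive_repeats := by
  intro lst _ hpre
  unfold Spec_remove_consecutive_repeats
  cases lst with
  | nil => exact absurd rfl hpre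
  | cons h t =>
    show remove_consecutive_repeats (h :: t) = remove_consecutive_repeats_alt (h :: t)
    unfold remove_consecutive_repeats remove_consecutive_repeats_alt
    simp only []
    rw [show (PySem.Dict.empty : PySem.Dict Int Int).insert 0 0 = PySem.Dict.mk [((0:Int), (0:Int))] from rfl]
    rw [pvLemA t h 0 0 [h] [((0:Int), (0:Int))] (by simp) (by simp)
          (by intro p hp
              obtain rfl := List.mem_singleton.mp hp
              exact (by omega : (0:Int) < 0 + 1))]
    rw [show (PySem.Dict.empty : PySem.Dict Int Int) = PySem.Dict.mk [] from rfl]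
    rw [pvLoopB_eq (h :: t).length (h :: t) le_rfl 0 0 [] [] (by intro p hp; simp at hp)]
    rw [pvRuns]
    rw [show (0:Int) + (pvRunLen h t : Int) + 1 = (pvRunLen h t : Int) + 1 by ring,
        show (0:Int) + 1 = 1 by ring]
    rw [PySem.List.pyRange_one_cons (show (0:Int) < (pvRunLen h t : Int) + 1 by omega)]
    rw [show (0:Int) + 1 = 1 by ring]
    simp
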